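-- pv_equiv track=rewrite | github.com/marcowus/GPE | cartpole_gpe_compare_refined.py | _multi_index_up_to_degree
-- ===== SOURCE A (Python) =====
-- def _multi_index_up_to_degree(n_dim, degree):
--     def gen(idx, remaining, current, out):
--         if idx == n_dim-1:
--             out.append(tuple(current + [remaining])); return
--         for v in range(remaining+1):
--             gen(idx+1, remaining-v, current+[v], out)
--     M=[]
--     for d in range(degree+1):
--         gen(0, d, [], M)
--     return M
-- ===== SOURCE B (Python) =====
-- def _multi_index_up_to_degree(n_dim, degree):
--     # bottom-up DP over dimensions instead of recursive descent
--     if degree < 0: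
--         return []
--     T = [[(r,)] for r in range(degree + 1)]
--     for _ in range(n_dim - 1):
--         T = [[(v,) + t for v in range(r + 1) for t in T[r - v]]
--              for r in range(degree + 1)]
--     M = []
--     for row in T:
--         M += row
--     return M
-- ===== Notes on version B (the rewrite author's own statement) =====
-- stated objective: alternative
-- what changed: Replaces A's recursive descent (gen appending one composition per leaf) with a bottom-up dynamic-programming table T[r] of compositions per residual degree, iterated once per extra dimension, then flattened.
import Mathlib
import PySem

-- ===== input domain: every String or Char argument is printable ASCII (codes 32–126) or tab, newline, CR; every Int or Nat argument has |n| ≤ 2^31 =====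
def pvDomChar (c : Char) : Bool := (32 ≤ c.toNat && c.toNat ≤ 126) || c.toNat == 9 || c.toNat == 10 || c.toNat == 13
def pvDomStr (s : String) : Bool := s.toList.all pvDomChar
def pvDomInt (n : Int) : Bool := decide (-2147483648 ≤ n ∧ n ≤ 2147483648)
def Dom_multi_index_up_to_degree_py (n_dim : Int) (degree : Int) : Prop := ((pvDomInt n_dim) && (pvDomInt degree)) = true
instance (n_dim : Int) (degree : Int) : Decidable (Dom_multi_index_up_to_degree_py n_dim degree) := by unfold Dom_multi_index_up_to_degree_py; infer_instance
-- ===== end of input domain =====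

-- B replaces A's recursive descent with a bottom-up DP table of compositions per residual degree (alternative decomposition, same output).

-- ===== PORT A =====
-- A's inner recursive 'gen'; fuel = remaining recursion depth n_dim-1-idx (A recurses until idx == n_dim-1)
def pyGenA (n_dim : Int) (idx : Int) (remaining : Int) (current : List Int)
    (out : List (List Int)) (fuel : Nat) : List (List Int) :=
  if idx = n_dim - 1 then out ++ [current ++ [remaining]]
  else match fuel with
    | 0 => out  -- unreachable when n_dim ≥ 1 and fuel = n_dim-1-idx (A diverges for n_dim ≤ 0; excluded by Pre_)
    | f + 1 =>
      (PySem.List.pyRange 0 (remaining + 1) 1).foldl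
        (fun acc v => pyGenA n_dim (idx + 1) (remaining - v) (current ++ [v]) acc f) out

def multi_index_up_to_degree_py (n_dim : Int) (degree : Int) : List (List Int) :=
  (PySem.List.pyRange 0 (degree + 1) 1).foldl
    (fun M d => pyGenA n_dim 0 d [] M (n_dim - 1).toNat) []

-- ===== PORT B =====
-- one DP iteration: T' = [[(v,)+t for v in range(r+1) for t in T[r-v]] for r in range(degree+1)]
def pyStepB (degree : Int) (T : List (List (List Int))) : List (List (List Int)) :=
  (PySem.List.pyRange 0 (degree + 1) 1).map (fun r =>
    (PySem.List.pyRange 0 (r + 1) 1).flatMap (fun v =>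
      (PySem.List.pyGetD T (r - v) []).map (fun t => v :: t)))

def multi_index_up_to_degree_py_alt (n_dim : Int) (degree : Int) : List (List Int) :=
  if degree < 0 then [] else
  let T0 : List (List (List Int)) := (PySem.List.pyRange 0 (degree + 1) 1).map (fun r => [[r]])
  let T := (PySem.List.pyRange 0 (n_dim - 1) 1).foldl (fun T _ => pyStepB degree T) T0
  T.foldl (fun M row => M ++ row) []

-- ===== PRECONDITION & SPEC =====
-- Pre_ excludes n_dim ≤ 0 with degree ≥ 0, where A's recursion never reaches its base case and raises RecursionError.
def Pre_multi_index_up_to_degree_py (n_dim : Int) (degree : Int) : Prop := 1 ≤ n_dim ∨ degree < 0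
instance (n_dim : Int) (degree : Int) : Decidable (Pre_multi_index_up_to_degree_py n_dim degree) := by unfold Pre_multi_index_up_to_degree_py; infer_instance
def pvWitness_multi_index_up_to_degree_py : Int × Int := (3, 2)

def Spec_multi_index_up_to_degree_py (n_dim : Int) (degree : Int) (out : List (List Int)) : Prop := out = multi_index_up_to_degree_py_alt n_dim degree
instance (n_dim : Int) (degree : Int) (out : List (List Int)) : Decidable (Spec_multi_index_up_to_degree_py n_dim degree out) := by unfold Spec_multi_index_up_to_degree_py; infer_instance

-- ===== CLAIM (what is proved, stated in full; the proofs are below) =====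
def Claim_equal_multi_index_up_to_degree_py : Prop := ∀ (n_dim : Int) (degree : Int), Dom_multi_index_up_to_degree_py n_dim degree → Pre_multi_index_up_to_degree_py n_dim degree → Spec_multi_index_up_to_degree_py n_dim degree (multi_index_up_to_degree_py n_dim degree)

-- ===== LEMMAS AND PROOFS =====

-- reference family: compositions of r into f+1 parts, ascending-lex order
def compsC (f : Nat) (r : Int) : List (List Int) :=
  match f with
  | 0 => [[r]]
  | f + 1 => (PySem.List.pyRange 0 (r + 1) 1).flatMap (fun v => (compsC f (r - v)).map (fun t => v :: t))

lemma genA_eq (n_dim : Int) : ∀ (f : Nat) (r : Int) (current : List Int) (out : List (List Int)),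
    pyGenA n_dim (n_dim - 1 - (f : Int)) r current out f = out ++ (compsC f r).map (fun t => current ++ t) := by
  intro f
  induction f with
  | zero => intro r current out; simp [pyGenA, compsC]
  | succ f ih =>
    intro r current out
    have hne : (n_dim - 1 - ((f : Nat) + 1 : Nat) : Int) ≠ n_dim - 1 := by push_cast; omega
    rw [pyGenA]
    rw [if_neg hne]
    have harg : (n_dim - 1 - ((f : Nat) + 1 : Nat) : Int) + 1 = n_dim - 1 - (f : Int) := by push_cast; omega
    rw [show (fun (acc : List (List Int)) (v : Int) =>
          pyGenA n_dim (n_dim - 1 - ((f : Nat) + 1 : Nat) + 1) (r - v) (current ++ [v]) acc f)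
        = fun acc v => acc ++ (compsC f (r - v)).map (fun t => (current ++ [v]) ++ t) from by
      funext acc v; rw [harg, ih]]
    rw [PySem.List.foldl_append_eq_flatMap]
    simp [compsC, List.map_flatMap, Function.comp_def]

lemma portA_eq (n_dim : Int) (degree : Int) (h : 1 ≤ n_dim) :
    multi_index_up_to_degree_py n_dim degree
      = (PySem.List.pyRange 0 (degree + 1) 1).flatMap (compsC (n_dim - 1).toNat) := by
  unfold multi_index_up_to_degree_py
  have h0 : (n_dim - 1 - ((n_dim - 1).toNat : Int)) = 0 := by omega
  rw [show (fun (M : List (List Int)) (d : Int) => pyGenA n_dim 0 d [] M (n_dim - 1).toNat)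
      = fun M d => M ++ (compsC (n_dim - 1).toNat d).map (fun t => [] ++ t) from by
    funext M d; rw [← h0, genA_eq]]
  rw [PySem.List.foldl_append_eq_flatMap]
  simp

lemma stepB_map (degree : Int) (m : Nat) :
    pyStepB degree ((PySem.List.pyRange 0 (degree + 1) 1).map (compsC m))
      = (PySem.List.pyRange 0 (degree + 1) 1).map (compsC (m + 1)) := by
  unfold pyStepB
  apply List.map_congr_left
  intro r hr
  rw [PySem.List.mem_pyRange_one] at hr
  rw [compsC]
  apply List.flatMap_congr  -- may not exist; fallback below
  intro v hv
  rw [PySem.List.mem_pyRange_one] at hv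
  rw [PySem.List.pyGetD_map_pyRange_of_nonneg _ _ _ _ (by omega) (by omega)]

lemma foldB_eq (degree : Int) : ∀ (l : List Int) (m : Nat),
    l.foldl (fun T _ => pyStepB degree T) ((PySem.List.pyRange 0 (degree + 1) 1).map (compsC m))
      = (PySem.List.pyRange 0 (degree + 1) 1).map (compsC (m + l.length)) := by
  intro l
  induction l with
  | nil => intro m; simp
  | cons x xs ih =>
    intro m
    have h : m + (xs.length + 1) = (m + 1) + xs.length := by omega
    simp only [List.foldl_cons, stepB_map, ih, List.length_cons, h]

lemma portB_eq (n_dim : Int) (degree : Int) :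
    multi_index_up_to_degree_py_alt n_dim degree
      = (PySem.List.pyRange 0 (degree + 1) 1).flatMap (compsC (n_dim - 1).toNat) := by
  by_cases hd : degree < 0
  · rw [show multi_index_up_to_degree_py_alt n_dim degree
        = (if degree < 0 then [] else
            ((PySem.List.pyRange 0 (n_dim - 1) 1).foldl (fun T _ => pyStepB degree T)
              ((PySem.List.pyRange 0 (degree + 1) 1).map (compsC 0))).foldl
              (fun M row => M ++ row) []) from rfl]
    rw [if_pos hd, PySem.List.pyRange_one_eq_nil (by omega)]
    simp
  rw [show multi_index_up_to_degree_py_alt n_dim degree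
      = (if degree < 0 then [] else ((PySem.List.pyRange 0 (n_dim - 1) 1).foldl (fun T _ => pyStepB degree T)
          ((PySem.List.pyRange 0 (degree + 1) 1).map (compsC 0))).foldl
          (fun M row => M ++ row) []) from rfl]
  rw [if_neg hd, foldB_eq, PySem.List.foldl_append_eq_flatten]
  rw [PySem.List.length_pyRange_one]
  simp [List.flatMap_def]

-- ===== VERDICT (by name: the statement is the Claim_ definition above) =====
theorem multi_index_up_to_degree_py_spec : Claim_equal_multi_index_up_to_degree_py := by
  intro n_dim degree _ hpre
  unfold Spec_multi_index_up_to_degree_py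
  rcases hpre with h | h
  · rw [portA_eq n_dim degree h, portB_eq]
  · by_cases h1 : 1 ≤ n_dim
    · rw [portA_eq n_dim degree h1, portB_eq]
    · have hnil : PySem.List.pyRange 0 (degree + 1) 1 = [] :=
        PySem.List.pyRange_one_eq_nil (by omega)
      rw [portB_eq, hnil]
      simp [multi_index_up_to_degree_py, hnil]
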